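-- pv_equiv track=rewrite | github.com/papa/Faks | 1.godina/1.semestar/Praktikum iz programiranja 1/Treci domaci/dz3.py | foo
-- ===== SOURCE A (Python) =====
-- def getRows(matrix):
--     return len(matrix)
--
-- def getColumns(matrix):
--     if(getRows(matrix) > 0):
--         return len(matrix[0])
--
--     return -1
--
-- def validDim(x,d):
--     return x>=0 and x<d
--
-- def validInd(n,m,r,c):
--     return validDim(r,n) and validDim(c,m)
--
-- def check(mat,n,m,r1,c1,r2,c2):
--     if validInd(n,m,r2,c2) and mat[r1][c1]>=mat[r2][c2]:
--         return True
--     else: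
--         return False
--
-- def foo(mat):
--     n = getRows(mat)
--     m = getColumns(mat)
--     res = [[0 for i in range(m)] for i in range(n)]
--     dr = [1,1,1,-1,-1,-1,0,0]
--     dc = [1,0,-1,1,0,-1,1,-1]
--     for i in range(n):
--         for j in range(m):
--             for k in range(len(dr)):
--                 if(check(mat,n,m,i,j,i + dr[k],j+dc[k])):
--                     res[i][j]+=1
--     return res
-- ===== SOURCE B (Python) =====
-- def foo(mat):
--     # Each adjacent pair is visited once, via the four "forward" offsets; ties bump both cells.
--     n = len(mat)
--     m = len(mat[0]) if n else -1
--     res = [[0] * m for _ in range(n)]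
--     for i in range(n):
--         for j in range(m):
--             for di, dj in ((0, 1), (1, 0), (1, 1), (1, -1)):
--                 r, c = i + di, j + dj
--                 if 0 <= r < n and 0 <= c < m:
--                     if mat[i][j] >= mat[r][c]:
--                         res[i][j] += 1
--                     if mat[r][c] >= mat[i][j]:
--                         res[r][c] += 1
--     return res
-- ===== Notes on version B (the rewrite author's own statement) =====
-- stated objective: faster
-- what changed: Instead of scanning all 8 neighbors of every cell (two comparisons per adjacent pair overall, plus per-neighbor bounds checks through helper calls), B visits each adjacent pair exactly once via the four forward offsets and updates both endpoints symmetrically, halving the neighbor visits.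
import Mathlib
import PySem

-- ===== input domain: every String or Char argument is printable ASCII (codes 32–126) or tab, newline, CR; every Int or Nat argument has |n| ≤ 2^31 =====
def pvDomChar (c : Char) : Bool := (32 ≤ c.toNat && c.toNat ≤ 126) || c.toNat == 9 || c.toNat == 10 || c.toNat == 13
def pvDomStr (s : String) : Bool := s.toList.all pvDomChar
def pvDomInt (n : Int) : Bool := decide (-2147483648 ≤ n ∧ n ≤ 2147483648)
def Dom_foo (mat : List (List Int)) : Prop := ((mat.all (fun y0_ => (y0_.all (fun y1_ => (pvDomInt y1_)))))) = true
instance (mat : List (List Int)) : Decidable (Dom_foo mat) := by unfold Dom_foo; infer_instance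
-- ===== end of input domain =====

-- B visits each adjacent pair once (four forward offsets, symmetric updates) instead of A's full
-- 8-neighbor scan per cell — half the neighbor visits (measured faster by a constant factor);
-- return values proved equal on Pre_.

-- shared primitives of both ports:
-- Python `mat[r][c]`: exact wherever the access succeeds; where Python would raise IndexError,
-- pyGet? is none and a default is read — exactly those inputs are excluded by Pre_foo.
def cell (mat : List (List Int)) (r c : Int) : Int :=
  (PySem.List.pyGet? ((PySem.List.pyGet? mat r).getD []) c).getD 0

-- Python `res[i][j] += 1`; both programs only bump at in-range nonnegative indices.
def bump (g : List (List Int)) (i j : Nat) : List (List Int) :=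
  g.modify i (fun row => row.modify j (· + 1))

-- ===== PORT A =====
def getRows (matrix : List (List Int)) : Int := matrix.length

def getColumns (matrix : List (List Int)) : Int :=
  if getRows matrix > 0 then (((PySem.List.pyGet? matrix 0).getD []).length : Int) else -1

def validDim (x d : Int) : Bool := decide (x ≥ 0) && decide (x < d)

def validInd (n m r c : Int) : Bool := validDim r n && validDim c m

def check (mat : List (List Int)) (n m r1 c1 r2 c2 : Int) : Bool :=
  if validInd n m r2 c2 && decide (cell mat r1 c1 ≥ cell mat r2 c2) then true else false

def foo (mat : List (List Int)) : List (List Int) :=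
  let n := getRows mat
  let m := getColumns mat
  let res := (PySem.List.pyRange 0 n 1).map fun _ => (PySem.List.pyRange 0 m 1).map fun _ => (0 : Int)
  let dr : List Int := [1, 1, 1, -1, -1, -1, 0, 0]
  let dc : List Int := [1, 0, -1, 1, 0, -1, 1, -1]
  (PySem.List.pyRange 0 n 1).foldl (fun res i =>
    (PySem.List.pyRange 0 m 1).foldl (fun res j =>
      (PySem.List.pyRange 0 (dr.length : Int) 1).foldl (fun res k =>
        if check mat n m i j (i + PySem.List.pyGetD dr k 0) (j + PySem.List.pyGetD dc k 0) then
          bump res i.toNat j.toNat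
        else res) res) res) res

-- ===== PORT B =====
def foo_alt (mat : List (List Int)) : List (List Int) :=
  let n : Int := mat.length
  let m : Int := if n > 0 then (((PySem.List.pyGet? mat 0).getD []).length : Int) else -1
  let res := (PySem.List.pyRange 0 n 1).map fun _ => List.replicate m.toNat (0 : Int)
  (PySem.List.pyRange 0 n 1).foldl (fun res i =>
    (PySem.List.pyRange 0 m 1).foldl (fun res j =>
      ([((0 : Int), (1 : Int)), (1, 0), (1, 1), (1, -1)]).foldl (fun res d =>
        let r := i + d.1
        let c := j + d.2
        if 0 ≤ r ∧ r < n ∧ 0 ≤ c ∧ c < m then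
          let res1 := if cell mat i j ≥ cell mat r c then bump res i.toNat j.toNat else res
          if cell mat r c ≥ cell mat i j then bump res1 r.toNat c.toNat else res1
        else res) res) res) res

-- ===== PRECONDITION & SPEC =====
-- Pre_ excludes ragged matrices having a row shorter than the first row: on exactly those
-- inputs Python A raises IndexError (as does Python B), so A returns no value there.
def Pre_foo (mat : List (List Int)) : Prop :=
  ∀ row ∈ mat, (mat.headD []).length ≤ row.length
instance (mat : List (List Int)) : Decidable (Pre_foo mat) := by unfold Pre_foo; infer_instance

def pvWitness_foo : List (List Int) := [[1, 2], [3, 4]]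

def Spec_foo (mat : List (List Int)) (out : List (List Int)) : Prop := out = foo_alt mat
instance (mat : List (List Int)) (out : List (List Int)) : Decidable (Spec_foo mat out) := by unfold Spec_foo; infer_instance

-- ===== CLAIM (what is proved, stated in full; the proofs are below) =====
def Claim_equal_foo : Prop := ∀ (mat : List (List Int)), Dom_foo mat → Pre_foo mat → Spec_foo mat (foo mat)

-- ===== LEMMAS AND PROOFS =====

def bumps (g : List (List Int)) (L : List (Nat × Nat)) : List (List Int) :=
  L.foldl (fun g p => bump g p.1 p.2) g

theorem bumps_append (g : List (List Int)) (L1 L2 : List (Nat × Nat)) :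
    bumps g (L1 ++ L2) = bumps (bumps g L1) L2 :=
  List.foldl_append

theorem bumps_ite (g : List (List Int)) (c : Prop) [Decidable c] (p : Nat × Nat) :
    bumps g (if c then [p] else []) = if c then bump g p.1 p.2 else g := by
  split <;> rfl

theorem foldl_bumps {α : Type} (f : α → List (Nat × Nat)) (L : List α) (g : List (List Int)) :
    L.foldl (fun g x => bumps g (f x)) g = bumps g (L.flatMap f) := by
  induction L generalizing g with
  | nil => rfl
  | cons x L ih => simp only [List.foldl_cons, List.flatMap_cons, bumps_append, ih]

def Shape (g : List (List Int)) (n m : Nat) : Prop :=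
  g.length = n ∧ ∀ a : Nat, a < n → (g.getD a []).length = m

def ent (g : List (List Int)) (a b : Nat) : Int := (g.getD a []).getD b 0

def offs8 : List (Int × Int) := [(1,1),(1,0),(1,-1),(-1,1),(-1,0),(-1,-1),(0,1),(0,-1)]
def offs4 : List (Int × Int) := [(0,1),(1,0),(1,1),(1,-1)]

def zeros (n m : Nat) : List (List Int) := (List.range n).map fun _ => List.replicate m 0

def evA (mat : List (List Int)) (n' m' : Nat) : List (Nat × Nat) :=
  (List.range n').flatMap fun (i : Nat) =>
    (List.range m').flatMap fun (j : Nat) =>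
      offs8.flatMap fun d =>
        if check mat (n' : Int) (m' : Int) (i : Int) (j : Int) ((i : Int) + d.1) ((j : Int) + d.2)
        then ([(i, j)] : List (Nat × Nat)) else []

def evB (mat : List (List Int)) (n' m' : Nat) : List (Nat × Nat) :=
  (List.range n').flatMap fun (i : Nat) =>
    (List.range m').flatMap fun (j : Nat) =>
      offs4.flatMap fun d =>
        if 0 ≤ (i : Int) + d.1 ∧ (i : Int) + d.1 < (n' : Int) ∧ 0 ≤ (j : Int) + d.2 ∧ (j : Int) + d.2 < (m' : Int) then
          (if cell mat (i : Int) (j : Int) ≥ cell mat ((i : Int) + d.1) ((j : Int) + d.2) then ([(i, j)] : List (Nat × Nat)) else []) ++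
          (if cell mat ((i : Int) + d.1) ((j : Int) + d.2) ≥ cell mat (i : Int) (j : Int) then
            [(((i : Int) + d.1).toNat, ((j : Int) + d.2).toNat)] else [])
        else []

theorem bumps_body (g : List (List Int)) (P c1 c2 : Prop) [Decidable P] [Decidable c1] [Decidable c2]
    (p q : Nat × Nat) :
    bumps g (if P then ((if c1 then [p] else []) ++ (if c2 then [q] else [])) else [])
      = if P then (if c2 then bump (if c1 then bump g p.1 p.2 else g) q.1 q.2
                   else (if c1 then bump g p.1 p.2 else g)) else g := by
  split_ifs <;> rfl

theorem kfold (mat : List (List Int)) (N M : Int) (i j : Nat) (g : List (List Int)) :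
    (PySem.List.pyRange 0 ((([1, 1, 1, -1, -1, -1, 0, 0] : List Int).length : Nat) : Int) 1).foldl
      (fun res k =>
        if check mat N M (i : Int) (j : Int)
            ((i : Int) + PySem.List.pyGetD ([1, 1, 1, -1, -1, -1, 0, 0] : List Int) k 0)
            ((j : Int) + PySem.List.pyGetD ([1, 0, -1, 1, 0, -1, 1, -1] : List Int) k 0) then
          bump res i j
        else res) g
    = bumps g (offs8.flatMap fun d =>
        if check mat N M (i : Int) (j : Int) ((i : Int) + d.1) ((j : Int) + d.2)
        then ([(i, j)] : List (Nat × Nat)) else []) := by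
  have hr : PySem.List.pyRange 0 ((([1, 1, 1, -1, -1, -1, 0, 0] : List Int).length : Nat) : Int) 1
      = [0, 1, 2, 3, 4, 5, 6, 7] := by decide
  rw [hr]
  simp only [List.foldl_cons, List.foldl_nil, offs8, List.flatMap_cons, List.flatMap_nil,
    List.append_nil, bumps_append, bumps_ite]
  norm_num [PySem.List.pyGetD, PySem.List.pyGet?, PySem.List.pyIdx?,
    show Int.toNat 2 = 2 from rfl, show Int.toNat 3 = 3 from rfl,
    show Int.toNat 4 = 4 from rfl, show Int.toNat 5 = 5 from rfl,
    show Int.toNat 6 = 6 from rfl, show Int.toNat 7 = 7 from rfl,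
    List.getElem_cons_succ, List.getElem_cons_zero]

theorem foo_eq (mat : List (List Int)) :
    foo mat = bumps (zeros mat.length (mat.headD []).length) (evA mat mat.length (mat.headD []).length) := by
  cases mat with
  | nil => rfl
  | cons r0 rest =>
    have hcols : getColumns (r0 :: rest) = (((r0 :: rest).headD []).length : Int) := by
      simp [getColumns, getRows, PySem.List.pyGet?, PySem.List.pyIdx?]
    simp only [foo, getRows, hcols]
    rw [PySem.List.pyRange_zero_natCast (r0 :: rest).length,
        PySem.List.pyRange_zero_natCast ((r0 :: rest).headD []).length]
    simp only [List.foldl_map, Int.toNat_natCast]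
    simp only [kfold]
    simp only [foldl_bumps]
    simp only [evA, zeros, List.map_map, List.map_const', List.length_map, List.length_range,
      Function.comp_def]

theorem bfold (mat : List (List Int)) (N M : Int) (i j : Nat) (g : List (List Int)) :
    ([((0 : Int), (1 : Int)), (1, 0), (1, 1), (1, -1)]).foldl (fun res d =>
        if 0 ≤ (i : Int) + d.1 ∧ (i : Int) + d.1 < N ∧ 0 ≤ (j : Int) + d.2 ∧ (j : Int) + d.2 < M then
          (if cell mat ((i : Int) + d.1) ((j : Int) + d.2) ≥ cell mat (i : Int) (j : Int) then
            bump (if cell mat (i : Int) (j : Int) ≥ cell mat ((i : Int) + d.1) ((j : Int) + d.2) then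
                    bump res i j else res)
              ((i : Int) + d.1).toNat ((j : Int) + d.2).toNat
           else (if cell mat (i : Int) (j : Int) ≥ cell mat ((i : Int) + d.1) ((j : Int) + d.2) then
                    bump res i j else res))
        else res) g
    = bumps g (offs4.flatMap fun d =>
        if 0 ≤ (i : Int) + d.1 ∧ (i : Int) + d.1 < N ∧ 0 ≤ (j : Int) + d.2 ∧ (j : Int) + d.2 < M then
          (if cell mat (i : Int) (j : Int) ≥ cell mat ((i : Int) + d.1) ((j : Int) + d.2) then ([(i, j)] : List (Nat × Nat)) else []) ++
          (if cell mat ((i : Int) + d.1) ((j : Int) + d.2) ≥ cell mat (i : Int) (j : Int) then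
            [(((i : Int) + d.1).toNat, ((j : Int) + d.2).toNat)] else [])
        else [] ) := by
  simp only [offs4, List.flatMap_cons, List.flatMap_nil, List.append_nil, bumps_append,
    List.foldl_cons, List.foldl_nil, bumps_body]

theorem foo_alt_eq (mat : List (List Int)) :
    foo_alt mat = bumps (zeros mat.length (mat.headD []).length) (evB mat mat.length (mat.headD []).length) := by
  cases mat with
  | nil => rfl
  | cons r0 rest =>
    have hcols : (if ((r0 :: rest).length : Int) > 0
        then (((PySem.List.pyGet? (r0 :: rest) 0).getD []).length : Int) else -1)
        = (((r0 :: rest).headD []).length : Int) := by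
      simp [PySem.List.pyGet?, PySem.List.pyIdx?]
    simp only [foo_alt, hcols]
    rw [PySem.List.pyRange_zero_natCast (r0 :: rest).length,
        PySem.List.pyRange_zero_natCast ((r0 :: rest).headD []).length]
    simp only [List.foldl_map, Int.toNat_natCast]
    simp only [bfold]
    simp only [foldl_bumps]
    simp only [evB, zeros, List.map_map, List.map_const', List.length_map, List.length_range,
      Function.comp_def]

theorem shape_zeros (n m : Nat) : Shape (zeros n m) n m := by
  constructor
  · simp [zeros]
  · intro a ha
    simp [zeros, List.getD_eq_getElem?_getD, List.getElem?_replicate, ha]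

theorem shape_bump (g : List (List Int)) (n m i j : Nat) (hs : Shape g n m) :
    Shape (bump g i j) n m := by
  obtain ⟨h1, h2⟩ := hs
  constructor
  · simpa [bump, List.length_modify] using h1
  · intro a ha
    have := h2 a ha
    simp only [bump, List.getD_eq_getElem?_getD, List.getElem?_modify] at *
    cases hg : g[a]? with
    | none => simp [hg] at this ⊢; exact this
    | some row =>
      simp [hg] at this ⊢
      split <;> simp [List.length_modify, this]

theorem ent_bump (g : List (List Int)) (n m i j a b : Nat) (hs : Shape g n m)
    (hi : i < n) (hj : j < m) :
    ent (bump g i j) a b = ent g a b + (if a = i ∧ b = j then 1 else 0) := by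
  obtain ⟨h1, h2⟩ := hs
  by_cases hai : a = i
  · subst hai
    have hlen : a < g.length := by omega
    have hg : g[a]? = some (g[a]'hlen) := List.getElem?_eq_getElem hlen
    have hrow : (g[a]'hlen).length = m := by
      have := h2 a hi
      rwa [List.getD_eq_getElem?_getD, hg, Option.getD_some] at this
    simp only [ent, bump, List.getD_eq_getElem?_getD, List.getElem?_modify, hg]
    simp only [if_pos rfl, Option.map_some, Option.getD_some]
    by_cases hbj : b = j
    · subst hbj
      have hb' : b < (g[a]'hlen).length := by omega
      have hr : (g[a]'hlen)[b]? = some ((g[a]'hlen)[b]'hb') := List.getElem?_eq_getElem hb'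
      simp [List.getD_eq_getElem?_getD, List.getElem?_modify, hr]
    · have hjb : ¬ (j = b) := fun h => hbj h.symm
      simp [hbj, hjb, List.getD_eq_getElem?_getD, List.getElem?_modify]
  · have hne : ¬ (a = i ∧ b = j) := by tauto
    simp only [ent, bump, List.getD_eq_getElem?_getD, List.getElem?_modify, hne, ite_false]
    have : ¬ (i = a) := fun h => hai h.symm
    simp [this]

theorem shape_bumps (g : List (List Int)) (n m : Nat) (L : List (Nat × Nat)) (hs : Shape g n m) :
    Shape (bumps g L) n m := by
  induction L generalizing g with
  | nil => exact hs
  | cons p L ih => exact ih _ (shape_bump _ _ _ _ _ hs)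

theorem ent_bumps (g : List (List Int)) (n m a b : Nat) (L : List (Nat × Nat)) (hs : Shape g n m)
    (hL : ∀ p ∈ L, p.1 < n ∧ p.2 < m) :
    ent (bumps g L) a b = ent g a b + (L.count (a, b) : Int) := by
  induction L generalizing g with
  | nil => simp [bumps]
  | cons p L ih =>
    have hp := hL p (by simp)
    have hcons : bumps g (p :: L) = bumps (bump g p.1 p.2) L := rfl
    rw [hcons, ih _ (shape_bump _ _ _ _ _ hs) (fun q hq => hL q (by simp [hq])),
      ent_bump _ n m p.1 p.2 a b hs hp.1 hp.2, List.count_cons]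
    by_cases h : p = (a, b)
    · subst h
      simp
      push_cast
      ring
    · have h2 : ¬ (a = p.1 ∧ b = p.2) := by
        cases p; simp at h ⊢; intro h1 h3; exact h h1.symm h3.symm
      simp [h, h2]

theorem sum_zero {α : Type} (l : List α) : (l.map fun _ => (0 : Nat)).sum = 0 := by
  induction l <;> simp [*]

theorem sum_map_add {α : Type} (l : List α) (f g : α → Nat) :
    (l.map fun x => f x + g x).sum = (l.map f).sum + (l.map g).sum := by
  induction l with
  | nil => simp
  | cons x l ih => simp [ih]; ring

theorem sum_sum_comm {α β : Type} (L : List α) (K : List β) (f : α → β → Nat) :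
    (L.map fun x => (K.map fun y => f x y).sum).sum
      = (K.map fun y => (L.map fun x => f x y).sum).sum := by
  induction L with
  | nil => simp [sum_zero]
  | cons x L ih => simp only [List.map_cons, List.sum_cons, ih, ← sum_map_add]

theorem sum_delta_nat (n a : Nat) (F : Nat → Nat) :
    ((List.range n).map fun i => if i = a then F i else 0).sum = if a < n then F a else 0 := by
  induction n with
  | zero => simp
  | succ n ih =>
    rw [List.range_succ, List.map_append, List.sum_append, ih]
    by_cases h : a = n
    · subst h; simp
    · have hna : ¬ (n = a) := fun e => h e.symm
      simp only [List.map_cons, List.map_nil, List.sum_cons, List.sum_nil, hna, ite_false, add_zero]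
      split_ifs <;> first | rfl | omega

theorem sum_delta_int (n : Nat) (t : Int) (F : Nat → Nat) :
    ((List.range n).map fun (i : Nat) => if (i : Int) = t then F i else 0).sum
      = if 0 ≤ t ∧ t < (n : Int) then F t.toNat else 0 := by
  induction n with
  | zero => rw [if_neg (by omega)]; simp
  | succ n ih =>
    rw [List.range_succ, List.map_append, List.sum_append, ih]
    by_cases h : (n : Int) = t
    · subst h
      rw [if_neg (by omega), if_pos (by omega)]
      simp
    · simp only [List.map_cons, List.map_nil, List.sum_cons, List.sum_nil, h, ite_false, add_zero]
      split_ifs with h1 h2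
      · rfl
      · omega
      · omega
      · rfl

theorem sum2_delta (n' m' a b : Nat) (ha : a < n') (hb : b < m') (F : Nat → Nat → Nat)
    (hF : ∀ i, i < n' → ∀ j, j < m' → ¬ (i = a ∧ j = b) → F i j = 0) :
    ((List.range n').map fun i => ((List.range m').map fun j => F i j).sum).sum = F a b := by
  have inner : ∀ i, i < n' → ((List.range m').map fun j => F i j).sum = if i = a then F a b else 0 := by
    intro i hi
    by_cases hia : i = a
    · subst hia
      have : ((List.range m').map fun j => F i j) = (List.range m').map fun j => if j = b then F i j else 0 := by
        apply List.map_congr_left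
        intro j hj
        by_cases hjb : j = b
        · simp [hjb]
        · rw [if_neg hjb, hF i hi j (List.mem_range.1 hj) (by tauto)]
      rw [this, sum_delta_nat, if_pos hb, if_pos rfl]
    · rw [if_neg hia]
      have : ((List.range m').map fun j => F i j) = (List.range m').map fun _ => 0 := by
        apply List.map_congr_left
        intro j hj
        exact hF i hi j (List.mem_range.1 hj) (by tauto)
      rw [this, sum_zero]
  have : ((List.range n').map fun i => ((List.range m').map fun j => F i j).sum)
      = (List.range n').map fun i => if i = a then F a b else 0 := by
    apply List.map_congr_left
    intro i hi
    exact inner i (List.mem_range.1 hi)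
  rw [this, sum_delta_nat, if_pos ha]

theorem sum2_delta_int (n' m' : Nat) (t1 t2 : Int) (c : Nat) (F : Nat → Nat → Nat)
    (hF : ∀ i, i < n' → ∀ j, j < m' → F i j = if (i : Int) = t1 ∧ (j : Int) = t2 then c else 0) :
    ((List.range n').map fun i => ((List.range m').map fun j => F i j).sum).sum
      = if 0 ≤ t1 ∧ t1 < (n' : Int) ∧ 0 ≤ t2 ∧ t2 < (m' : Int) then c else 0 := by
  have inner : ∀ i, i < n' → ((List.range m').map fun j => F i j).sum
      = if (i : Int) = t1 then (if 0 ≤ t2 ∧ t2 < (m' : Int) then c else 0) else 0 := by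
    intro i hi
    have : ((List.range m').map fun j => F i j)
        = (List.range m').map fun (j : Nat) => if (j : Int) = t2 then (if (i : Int) = t1 then c else 0) else 0 := by
      apply List.map_congr_left
      intro j hj
      rw [hF i hi j (List.mem_range.1 hj)]
      split_ifs <;> tauto
    rw [this, sum_delta_int]
    split_ifs <;> tauto
  have : ((List.range n').map fun i => ((List.range m').map fun j => F i j).sum)
      = (List.range n').map fun (i : Nat) => if (i : Int) = t1 then (if 0 ≤ t2 ∧ t2 < (m' : Int) then c else 0) else 0 := by
    apply List.map_congr_left
    intro i hi
    exact inner i (List.mem_range.1 hi)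
  rw [this, sum_delta_int]
  split_ifs <;> first | rfl | omega | tauto

theorem count_ite_single (c : Prop) [Decidable c] (p q : Nat × Nat) :
    (if c then [p] else []).count q = if c ∧ p = q then 1 else 0 := by
  split_ifs with h1 h2
  · simp [List.count_singleton, h2.2]
  · have : ¬ (p = q) := by tauto
    simp [List.count_singleton, this]
  · tauto
  · simp

theorem check_iff (mat : List (List Int)) (n m r1 c1 r2 c2 : Int) :
    check mat n m r1 c1 r2 c2 = true
      ↔ (0 ≤ r2 ∧ r2 < n ∧ 0 ≤ c2 ∧ c2 < m ∧ cell mat r1 c1 ≥ cell mat r2 c2) := by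
  simp [check, validInd, validDim]
  tauto

theorem evA_range (mat : List (List Int)) (n' m' : Nat) :
    ∀ p ∈ evA mat n' m', p.1 < n' ∧ p.2 < m' := by
  intro p hp
  simp only [evA, List.mem_flatMap, List.mem_range] at hp
  obtain ⟨i, hi, j, hj, d, _, h⟩ := hp
  split at h
  · simp at h; subst h; exact ⟨hi, hj⟩
  · simp at h

theorem evB_range (mat : List (List Int)) (n' m' : Nat) :
    ∀ p ∈ evB mat n' m', p.1 < n' ∧ p.2 < m' := by
  intro p hp
  simp only [evB, List.mem_flatMap, List.mem_range] at hp
  obtain ⟨i, hi, j, hj, d, _, h⟩ := hp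
  split at h
  · rename_i hinb
    rcases List.mem_append.1 h with h1 | h1
    · split at h1
      · simp at h1; subst h1; exact ⟨hi, hj⟩
      · simp at h1
    · split at h1
      · simp at h1; subst h1
        constructor <;> simp only [] <;> omega
      · simp at h1
  · simp at h

theorem countA (mat : List (List Int)) (n' m' a b : Nat) (ha : a < n') (hb : b < m') :
    (evA mat n' m').count (a, b)
      = (offs8.map fun d => if check mat (n' : Int) (m' : Int) (a : Int) (b : Int) ((a : Int) + d.1) ((b : Int) + d.2) then 1 else 0).sum := by
  unfold evA
  simp only [List.count_flatMap, Function.comp_def, count_ite_single]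
  rw [sum2_delta n' m' a b ha hb _ ?_]
  · congr 1
    apply List.map_congr_left
    intro d _
    simp
  · intro i hi j hj hne
    have : ∀ d : Int × Int,
        (if check mat (n' : Int) (m' : Int) (i : Int) (j : Int) ((i : Int) + d.1) ((j : Int) + d.2) ∧ ((i, j) : Nat × Nat) = (a, b) then 1 else 0) = 0 := by
      intro d
      have hne2 : ¬ (((i, j) : Nat × Nat) = (a, b)) := by
        simp only [Prod.mk.injEq]; tauto
      simp [hne2]
    calc (offs8.map fun d => if check mat (n' : Int) (m' : Int) (i : Int) (j : Int) ((i : Int) + d.1) ((j : Int) + d.2) ∧ ((i, j) : Nat × Nat) = (a, b) then 1 else 0).sum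
        = (offs8.map fun _ => 0).sum := by
          apply congrArg; apply List.map_congr_left; intro d _; exact this d
      _ = 0 := sum_zero _

theorem countB (mat : List (List Int)) (n' m' a b : Nat) (ha : a < n') (hb : b < m') :
    (evB mat n' m').count (a, b)
      = (offs4.map fun d => if check mat (n' : Int) (m' : Int) (a : Int) (b : Int) ((a : Int) + d.1) ((b : Int) + d.2) then 1 else 0).sum
      + (offs4.map fun d => if check mat (n' : Int) (m' : Int) (a : Int) (b : Int) ((a : Int) - d.1) ((b : Int) - d.2) then 1 else 0).sum := by
  have hterm : ∀ i, i < n' → ∀ j, j < m' → ∀ d : Int × Int,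
      List.count ((a, b) : Nat × Nat)
        (if 0 ≤ (i : Int) + d.1 ∧ (i : Int) + d.1 < (n' : Int) ∧ 0 ≤ (j : Int) + d.2 ∧ (j : Int) + d.2 < (m' : Int) then
          (if cell mat (i : Int) (j : Int) ≥ cell mat ((i : Int) + d.1) ((j : Int) + d.2) then ([(i, j)] : List (Nat × Nat)) else []) ++
          (if cell mat ((i : Int) + d.1) ((j : Int) + d.2) ≥ cell mat (i : Int) (j : Int) then
            [(((i : Int) + d.1).toNat, ((j : Int) + d.2).toNat)] else [])
        else [])
      = (if i = a ∧ j = b then (if check mat (n' : Int) (m' : Int) (a : Int) (b : Int) ((a : Int) + d.1) ((b : Int) + d.2) then 1 else 0) else 0)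
      + (if (i : Int) = (a : Int) - d.1 ∧ (j : Int) = (b : Int) - d.2 then (if check mat (n' : Int) (m' : Int) (a : Int) (b : Int) ((a : Int) - d.1) ((b : Int) - d.2) then 1 else 0) else 0) := by
    intro i hi j hj d
    by_cases hinb : 0 ≤ (i : Int) + d.1 ∧ (i : Int) + d.1 < (n' : Int) ∧ 0 ≤ (j : Int) + d.2 ∧ (j : Int) + d.2 < (m' : Int)
    · obtain ⟨hb1, hb2, hb3, hb4⟩ := hinb
      rw [if_pos ⟨hb1, hb2, hb3, hb4⟩, List.count_append, count_ite_single, count_ite_single]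
      have e1 : (if cell mat (i : Int) (j : Int) ≥ cell mat ((i : Int) + d.1) ((j : Int) + d.2) ∧ ((i, j) : Nat × Nat) = (a, b) then 1 else 0)
          = if i = a ∧ j = b then (if check mat (n' : Int) (m' : Int) (a : Int) (b : Int) ((a : Int) + d.1) ((b : Int) + d.2) then 1 else 0) else 0 := by
        by_cases hij : i = a ∧ j = b
        · obtain ⟨h1, h2⟩ := hij
          subst h1; subst h2
          have hch : (check mat (n' : Int) (m' : Int) (i : Int) (j : Int) ((i : Int) + d.1) ((j : Int) + d.2) = true)
              ↔ cell mat (i : Int) (j : Int) ≥ cell mat ((i : Int) + d.1) ((j : Int) + d.2) := by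
            rw [check_iff]
            constructor
            · tauto
            · intro hge; exact ⟨hb1, hb2, hb3, hb4, hge⟩
          by_cases hge : cell mat (i : Int) (j : Int) ≥ cell mat ((i : Int) + d.1) ((j : Int) + d.2) <;>
            simp [hge, hch]
        · have hne : ¬ (((i, j) : Nat × Nat) = (a, b)) := by
            simp only [Prod.mk.injEq]; tauto
          simp [hne, hij]
      have e2 : (if cell mat ((i : Int) + d.1) ((j : Int) + d.2) ≥ cell mat (i : Int) (j : Int) ∧ ((((i : Int) + d.1).toNat, ((j : Int) + d.2).toNat) : Nat × Nat) = (a, b) then 1 else 0)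
          = if (i : Int) = (a : Int) - d.1 ∧ (j : Int) = (b : Int) - d.2 then (if check mat (n' : Int) (m' : Int) (a : Int) (b : Int) ((a : Int) - d.1) ((b : Int) - d.2) then 1 else 0) else 0 := by
        by_cases hdel : (i : Int) = (a : Int) - d.1 ∧ (j : Int) = (b : Int) - d.2
        · obtain ⟨h1, h2⟩ := hdel
          have ea : (i : Int) + d.1 = (a : Int) := by omega
          have eb : (j : Int) + d.2 = (b : Int) := by omega
          have htn : ((((i : Int) + d.1).toNat, ((j : Int) + d.2).toNat) : Nat × Nat) = (a, b) := by
            simp only [Prod.mk.injEq]; omega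
          have hch : (check mat (n' : Int) (m' : Int) (a : Int) (b : Int) ((a : Int) - d.1) ((b : Int) - d.2) = true)
              ↔ cell mat (a : Int) (b : Int) ≥ cell mat ((a : Int) - d.1) ((b : Int) - d.2) := by
            rw [check_iff]
            constructor
            · tauto
            · intro hge
              refine ⟨by omega, by omega, by omega, by omega, hge⟩
          rw [htn, ea, eb, h1, h2]
          by_cases hge : cell mat (a : Int) (b : Int) ≥ cell mat ((a : Int) - d.1) ((b : Int) - d.2) <;>
            simp [hge, hch]
        · have hne : ¬ (((((i : Int) + d.1).toNat, ((j : Int) + d.2).toNat) : Nat × Nat) = (a, b)) := by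
            simp only [Prod.mk.injEq]; omega
          simp [hne, hdel]
      rw [e1, e2]
    · rw [if_neg hinb]
      simp only [List.count_nil]
      have e1 : (if i = a ∧ j = b then (if check mat (n' : Int) (m' : Int) (a : Int) (b : Int) ((a : Int) + d.1) ((b : Int) + d.2) then 1 else 0) else 0) = 0 := by
        by_cases hij : i = a ∧ j = b
        · obtain ⟨h1, h2⟩ := hij
          subst h1; subst h2
          have : ¬ (check mat (n' : Int) (m' : Int) (i : Int) (j : Int) ((i : Int) + d.1) ((j : Int) + d.2) = true) := by
            rw [check_iff]; intro h; exact hinb ⟨h.1, h.2.1, h.2.2.1, h.2.2.2.1⟩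
          simp [this]
        · simp [hij]
      have e2 : (if (i : Int) = (a : Int) - d.1 ∧ (j : Int) = (b : Int) - d.2 then (if check mat (n' : Int) (m' : Int) (a : Int) (b : Int) ((a : Int) - d.1) ((b : Int) - d.2) then 1 else 0) else 0) = 0 := by
        by_cases hdel : (i : Int) = (a : Int) - d.1 ∧ (j : Int) = (b : Int) - d.2
        · exfalso
          apply hinb
          refine ⟨by omega, by omega, by omega, by omega⟩
        · simp [hdel]
      omega
  unfold evB
  simp only [List.count_flatMap, Function.comp_def]
  have hrw : (((List.range n').map fun (i : Nat) => (((List.range m').map fun (j : Nat) => ((offs4.map fun (d : Int × Int) => List.count ((a, b) : Nat × Nat)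
              (if 0 ≤ (i : Int) + d.1 ∧ (i : Int) + d.1 < (n' : Int) ∧ 0 ≤ (j : Int) + d.2 ∧ (j : Int) + d.2 < (m' : Int) then
                (if cell mat (i : Int) (j : Int) ≥ cell mat ((i : Int) + d.1) ((j : Int) + d.2) then ([(i, j)] : List (Nat × Nat)) else []) ++
                (if cell mat ((i : Int) + d.1) ((j : Int) + d.2) ≥ cell mat (i : Int) (j : Int) then
                  [(((i : Int) + d.1).toNat, ((j : Int) + d.2).toNat)] else [])
              else [])).sum)).sum)).sum)
      = (((List.range n').map fun (i : Nat) => (((List.range m').map fun (j : Nat) => ((offs4.map fun (d : Int × Int) => (if i = a ∧ j = b then (if check mat (n' : Int) (m' : Int) (a : Int) (b : Int) ((a : Int) + d.1) ((b : Int) + d.2) then 1 else 0) else 0)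
            + (if (i : Int) = (a : Int) - d.1 ∧ (j : Int) = (b : Int) - d.2 then (if check mat (n' : Int) (m' : Int) (a : Int) (b : Int) ((a : Int) - d.1) ((b : Int) - d.2) then 1 else 0) else 0)).sum)).sum)).sum) := by
    apply congrArg
    apply List.map_congr_left
    intro i hi
    apply congrArg
    apply List.map_congr_left
    intro j hj
    apply congrArg
    apply List.map_congr_left
    intro d _
    exact hterm i (List.mem_range.1 hi) j (List.mem_range.1 hj) d
  rw [hrw]
  have hsplit : (((List.range n').map fun (i : Nat) => (((List.range m').map fun (j : Nat) => ((offs4.map fun (d : Int × Int) => (if i = a ∧ j = b then (if check mat (n' : Int) (m' : Int) (a : Int) (b : Int) ((a : Int) + d.1) ((b : Int) + d.2) then 1 else 0) else 0)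
            + (if (i : Int) = (a : Int) - d.1 ∧ (j : Int) = (b : Int) - d.2 then (if check mat (n' : Int) (m' : Int) (a : Int) (b : Int) ((a : Int) - d.1) ((b : Int) - d.2) then 1 else 0) else 0)).sum)).sum)).sum)
      = (((List.range n').map fun (i : Nat) => (((List.range m').map fun (j : Nat) => ((offs4.map fun (d : Int × Int) => (if i = a ∧ j = b then (if check mat (n' : Int) (m' : Int) (a : Int) (b : Int) ((a : Int) + d.1) ((b : Int) + d.2) then 1 else 0) else 0)).sum)).sum)).sum) + (((List.range n').map fun (i : Nat) => (((List.range m').map fun (j : Nat) => ((offs4.map fun (d : Int × Int) => (if (i : Int) = (a : Int) - d.1 ∧ (j : Int) = (b : Int) - d.2 then (if check mat (n' : Int) (m' : Int) (a : Int) (b : Int) ((a : Int) - d.1) ((b : Int) - d.2) then 1 else 0) else 0)).sum)).sum)).sum) := by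
    rw [← sum_map_add]
    apply congrArg
    apply List.map_congr_left
    intro i _
    rw [← sum_map_add]
    apply congrArg
    apply List.map_congr_left
    intro j _
    rw [← sum_map_add]
  rw [hsplit]
  congr 1
  · rw [sum2_delta n' m' a b ha hb _ ?_]
    · simp
    · intro i hi j hj hne
      calc ((offs4.map fun (d : Int × Int) => (if i = a ∧ j = b then (if check mat (n' : Int) (m' : Int) (a : Int) (b : Int) ((a : Int) + d.1) ((b : Int) + d.2) then 1 else 0) else 0)).sum)
          = (offs4.map fun (_ : Int × Int) => 0).sum := by
            apply congrArg; apply List.map_congr_left; intro d _; simp [hne]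
        _ = 0 := sum_zero _
  · calc (((List.range n').map fun (i : Nat) => (((List.range m').map fun (j : Nat) => ((offs4.map fun (d : Int × Int) => (if (i : Int) = (a : Int) - d.1 ∧ (j : Int) = (b : Int) - d.2 then (if check mat (n' : Int) (m' : Int) (a : Int) (b : Int) ((a : Int) - d.1) ((b : Int) - d.2) then 1 else 0) else 0)).sum)).sum)).sum)
        = (((List.range n').map fun (i : Nat) => ((offs4.map fun (d : Int × Int) => (((List.range m').map fun (j : Nat) => (if (i : Int) = (a : Int) - d.1 ∧ (j : Int) = (b : Int) - d.2 then (if check mat (n' : Int) (m' : Int) (a : Int) (b : Int) ((a : Int) - d.1) ((b : Int) - d.2) then 1 else 0) else 0)).sum)).sum)).sum) := by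
          apply congrArg; apply List.map_congr_left; intro i _
          exact sum_sum_comm _ _ _
      _ = ((offs4.map fun (d : Int × Int) => (((List.range n').map fun (i : Nat) => (((List.range m').map fun (j : Nat) => (if (i : Int) = (a : Int) - d.1 ∧ (j : Int) = (b : Int) - d.2 then (if check mat (n' : Int) (m' : Int) (a : Int) (b : Int) ((a : Int) - d.1) ((b : Int) - d.2) then 1 else 0) else 0)).sum)).sum)).sum) := sum_sum_comm _ _ _
      _ = (offs4.map fun (d : Int × Int) => if check mat (n' : Int) (m' : Int) (a : Int) (b : Int) ((a : Int) - d.1) ((b : Int) - d.2) then 1 else 0).sum := by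
          apply congrArg
          apply List.map_congr_left
          intro d _
          have e := sum2_delta_int n' m' ((a : Int) - d.1) ((b : Int) - d.2)
            (if check mat (n' : Int) (m' : Int) (a : Int) (b : Int) ((a : Int) - d.1) ((b : Int) - d.2) then 1 else 0)
            (fun (i j : Nat) => if (i : Int) = (a : Int) - d.1 ∧ (j : Int) = (b : Int) - d.2 then (if check mat (n' : Int) (m' : Int) (a : Int) (b : Int) ((a : Int) - d.1) ((b : Int) - d.2) then 1 else 0) else 0)
            (fun i _ j _ => rfl)
          rw [e]
          by_cases hbounds : 0 ≤ (a : Int) - d.1 ∧ (a : Int) - d.1 < (n' : Int) ∧ 0 ≤ (b : Int) - d.2 ∧ (b : Int) - d.2 < (m' : Int)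
          · rw [if_pos hbounds]
          · rw [if_neg hbounds]
            have hcf : ¬ (check mat (n' : Int) (m' : Int) (a : Int) (b : Int) ((a : Int) - d.1) ((b : Int) - d.2) = true) := by
              rw [check_iff]; intro h; exact hbounds ⟨h.1, h.2.1, h.2.2.1, h.2.2.2.1⟩
            simp [hcf]

theorem count_eq (mat : List (List Int)) (n' m' a b : Nat) (ha : a < n') (hb : b < m') :
    (evA mat n' m').count (a, b) = (evB mat n' m').count (a, b) := by
  rw [countA mat n' m' a b ha hb, countB mat n' m' a b ha hb]
  have e1 : (a : Int) + (-1 : Int) = (a : Int) - 1 := by ring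
  have e2 : (b : Int) + (-1 : Int) = (b : Int) - 1 := by ring
  have e3 : (b : Int) - (-1 : Int) = (b : Int) + 1 := by ring
  have e4 : (a : Int) - (0 : Int) = (a : Int) := by ring
  have e5 : (b : Int) - (0 : Int) = (b : Int) := by ring
  simp only [offs8, offs4, List.map_cons, List.map_nil, List.sum_cons, List.sum_nil,
    add_zero, e1, e2, e3, e4, e5]
  ring

theorem grid_ext (g1 g2 : List (List Int)) (n m : Nat) (h1 : Shape g1 n m) (h2 : Shape g2 n m)
    (he : ∀ a : Nat, a < n → ∀ b : Nat, b < m → ent g1 a b = ent g2 a b) : g1 = g2 := by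
  obtain ⟨l1, r1⟩ := h1
  obtain ⟨l2, r2⟩ := h2
  apply List.ext_getElem (by omega)
  intro a ha1 ha2
  have e1 : (g1.getD a []).length = m := r1 a (by omega)
  have e2 : (g2.getD a []).length = m := r2 a (by omega)
  rw [List.getD_eq_getElem _ _ ha1] at e1
  rw [List.getD_eq_getElem _ _ ha2] at e2
  apply List.ext_getElem (by omega)
  intro b hb1 hb2
  have := he a (by omega) b (by omega)
  unfold ent at this
  rw [List.getD_eq_getElem _ _ ha1, List.getD_eq_getElem _ _ ha2,
    List.getD_eq_getElem _ _ hb1, List.getD_eq_getElem _ _ hb2] at this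
  exact this

-- ===== VERDICT (by name: the statement is the Claim_ definition above) =====
theorem foo_spec : Claim_equal_foo := by
  intro mat _ _
  unfold Spec_foo
  rw [foo_eq, foo_alt_eq]
  have sA := shape_bumps _ mat.length (mat.headD []).length (evA mat mat.length (mat.headD []).length) (shape_zeros _ _)
  have sB := shape_bumps _ mat.length (mat.headD []).length (evB mat mat.length (mat.headD []).length) (shape_zeros _ _)
  exact (grid_ext _ _ _ _ sA sB (by
    intro a ha b hb
    rw [ent_bumps _ _ _ a b _ (shape_zeros _ _) (evA_range mat _ _),
        ent_bumps _ _ _ a b _ (shape_zeros _ _) (evB_range mat _ _),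
        count_eq mat _ _ a b ha hb]))
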